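-- pv_equiv track=rewrite | github.com/ahfie/IPv6-address-compression | compression.py | zero_sequences
-- ===== SOURCE A (Python) =====
-- def zero_sequences(address):
--     N = len(address)
--     result = []
--     index = -1
--     length = 0
--     i = 0
--     j = 0
--     while (i < N):
--         if j == N:
--             return result
--         if address[i] == 0:
--             index = i
--             length += 1
--             j = i + 1
--             while (j < N):
--                 if address[j] == 0:
--                     length += 1
--                     j += 1
--                 else:
--                     i = j
--                     j = len(address) + 1
--             result.append((index, length))
--             length = 0
--         i += 1
--     return result
-- ===== SOURCE B (Python) =====
-- def zero_sequences(address):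
--     result = []
--     run = 0
--     for i, x in enumerate(address):
--         if x == 0:
--             run += 1
--         else:
--             if run:
--                 result.append((i - run, run))
--             run = 0
--     if run:
--         result.append((len(address) - run, run))
--     return result
-- ===== Notes on version B (the rewrite author's own statement) =====
-- stated objective: simpler
-- what changed: Replaced A's nested two-pointer while-loops (with sentinel j = N+1 and early return on j == N) by a single enumerate pass that carries the current zero-run length and emits (start, length) when a run ends.
import Mathlib
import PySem

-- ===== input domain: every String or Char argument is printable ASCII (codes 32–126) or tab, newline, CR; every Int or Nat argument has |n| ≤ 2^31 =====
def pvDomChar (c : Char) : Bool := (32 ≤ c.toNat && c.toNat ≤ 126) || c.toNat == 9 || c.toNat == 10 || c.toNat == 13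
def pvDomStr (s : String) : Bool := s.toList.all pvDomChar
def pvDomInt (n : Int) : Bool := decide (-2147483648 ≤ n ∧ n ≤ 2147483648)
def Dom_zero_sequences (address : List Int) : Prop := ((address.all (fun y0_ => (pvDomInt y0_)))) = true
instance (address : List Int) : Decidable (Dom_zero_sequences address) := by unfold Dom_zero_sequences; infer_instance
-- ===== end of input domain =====

-- B replaces A's nested two-pointer while-loops by a single enumerate/fold pass
-- carrying the current zero-run length (objective: simpler, one pass, no inner scan).

-- ===== PORT A =====
-- inner while-loop of A: scan zeros from j, returning (length, i, j) as mutated.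
-- The Nat counter is the loop measure (N - j), consumed once per iteration.
def zsInnerGo (address : List Int) (N : Int) : Nat → Int → Int → Int → Int × Int × Int
  | 0, i, j, length => (length, i, j)
  | n + 1, i, j, length =>
    if j < N then
      if PySem.List.pyGetD address j 0 = 0 then
        zsInnerGo address N n i (j + 1) (length + 1)
      else (length, j, N + 1)          -- i = j; j = len(address) + 1
    else (length, i, j)

def zsInner (address : List Int) (N i j length : Int) : Int × Int × Int :=
  zsInnerGo address N (N - j).toNat i j length

-- outer while-loop of A (counter = N - i, an upper bound on the remaining iterations)
def zsOuterGo (address : List Int) (N : Int) :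
    Nat → List (Int × Int) → Int → Int → Int → List (Int × Int)
  | 0, result, _, _, _ => result
  | n + 1, result, i, j, length =>
    if i < N then
      if j = N then result
      else if PySem.List.pyGetD address i 0 = 0 then
        let r := zsInner address N i (i + 1) (length + 1)
        zsOuterGo address N n (result ++ [(i, r.1)]) (r.2.1 + 1) r.2.2 0
      else zsOuterGo address N n result (i + 1) j length
    else result

def zsOuter (address : List Int) (N : Int) (result : List (Int × Int)) (i j length : Int) :
    List (Int × Int) :=
  zsOuterGo address N (N - i).toNat result i j length

def zero_sequences (address : List Int) : List (Int × Int) :=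
  zsOuter address (address.length : Int) [] 0 0 0

-- ===== PORT B =====
def zero_sequences_alt (address : List Int) : List (Int × Int) :=
  let st := (PySem.List.enumerate address 0).foldl
    (fun (acc : List (Int × Int) × Int) (p : Int × Int) =>
      if p.2 = 0 then (acc.1, acc.2 + 1)
      else if acc.2 ≠ 0 then (acc.1 ++ [(p.1 - acc.2, acc.2)], 0) else (acc.1, 0))
    ([], 0)
  if st.2 ≠ 0 then st.1 ++ [((address.length : Int) - st.2, st.2)] else st.1

-- ===== PRECONDITION & SPEC =====
def Spec_zero_sequences (address : List Int) (out : List (Int × Int)) : Prop := out = zero_sequences_alt address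
instance (address : List Int) (out : List (Int × Int)) : Decidable (Spec_zero_sequences address out) := by unfold Spec_zero_sequences; infer_instance

-- ===== CLAIM (what is proved, stated in full; the proofs are below) =====
def Claim_equal_zero_sequences : Prop := ∀ (address : List Int), Dom_zero_sequences address → Spec_zero_sequences address (zero_sequences address)

-- ===== LEMMAS AND PROOFS =====

-- reference recursion: runs of zeros of xs, xs starting at absolute index i,
-- with `run` zeros pending immediately before xs
def runsAux : List Int → Int → Int → List (Int × Int)
  | [], i, run => if run ≠ 0 then [(i - run, run)] else []
  | x :: xs, i, run =>
      if x = 0 then runsAux xs (i + 1) (run + 1)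
      else if run ≠ 0 then (i - run, run) :: runsAux xs (i + 1) 0
      else runsAux xs (i + 1) 0

theorem alt_eq_runsAux_aux (xs : List Int) : ∀ (i : Int) (res : List (Int × Int)) (run : Int),
    (let st := (PySem.List.enumerate xs i).foldl
      (fun (acc : List (Int × Int) × Int) (p : Int × Int) =>
        if p.2 = 0 then (acc.1, acc.2 + 1)
        else if acc.2 ≠ 0 then (acc.1 ++ [(p.1 - acc.2, acc.2)], 0) else (acc.1, 0))
      (res, run);
     if st.2 ≠ 0 then st.1 ++ [(i + (xs.length : Int) - st.2, st.2)] else st.1)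
    = res ++ runsAux xs i run := by
  induction xs with
  | nil => intro i res run; simp [PySem.List.enumerate_nil, runsAux]; split_ifs <;> simp
  | cons x xs ih =>
    intro i res run
    rw [PySem.List.enumerate_cons]
    simp only [List.foldl_cons]
    by_cases hx : x = 0
    · have := ih (i + 1) res (run + 1)
      simp only [hx, runsAux] at *
      simpa [add_comm, add_left_comm, add_assoc] using this
    · by_cases hr : run ≠ 0
      · have := ih (i + 1) (res ++ [(i - run, run)]) 0
        simp only [runsAux, hx] at *
        simp only [if_pos hr] at *
        simpa [add_comm, add_left_comm, add_assoc, List.append_assoc] using this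
      · have := ih (i + 1) res 0
        simp only [runsAux, hx] at *
        simp only [if_neg hr] at *
        simpa [add_comm, add_left_comm, add_assoc] using this

theorem zsOuterGo_stop (address : List Int) (N : Int) :
    ∀ (n : Nat) (res : List (Int × Int)) (i length : Int),
    zsOuterGo address N n res i N length = res := by
  intro n res i length
  cases n <;> simp [zsOuterGo]

-- characterization of A's inner loop: it counts the zeros from index j onwards
theorem zsInnerGo_eq (a : List Int) : ∀ (n : Nat) (j : Int), 0 ≤ j → j.toNat ≤ a.length →
    a.length - j.toNat ≤ n → ∀ (i l : Int),
    zsInnerGo a (a.length : Int) n i j l =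
      (if ((a.drop j.toNat).takeWhile (fun x => x == 0)).length = (a.drop j.toNat).length
       then (l + (((a.drop j.toNat).takeWhile (fun x => x == 0)).length : Int), i,
             j + (((a.drop j.toNat).takeWhile (fun x => x == 0)).length : Int))
       else (l + (((a.drop j.toNat).takeWhile (fun x => x == 0)).length : Int),
             j + (((a.drop j.toNat).takeWhile (fun x => x == 0)).length : Int),
             (a.length : Int) + 1)) := by
  intro n
  induction n with
  | zero =>
    intro j hj0 hjle hn i l
    have hje : j.toNat = a.length := by omega
    have hdrop : a.drop j.toNat = [] := List.drop_eq_nil_of_le (by omega)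
    simp [zsInnerGo, hdrop]
  | succ n ih =>
    intro j hj0 hjle hn i l
    by_cases hlt : j < (a.length : Int)
    case neg =>
      have hdrop : a.drop j.toNat = [] := List.drop_eq_nil_of_le (by omega)
      rw [zsInnerGo, if_neg hlt]
      simp [hdrop]
    case pos =>
      have hjlt : j.toNat < a.length := by omega
      have hdrop : a.drop j.toNat = a[j.toNat] :: a.drop (j.toNat + 1) :=
        List.drop_eq_getElem_cons hjlt
      have hnext : (j + 1).toNat = j.toNat + 1 := by omega
      rw [zsInnerGo, if_pos hlt]
      by_cases hz : PySem.List.pyGetD a j 0 = 0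
      case pos =>
        have hget : a[j.toNat] = 0 := by
          rw [PySem.List.pyGetD_eq_getElem a 0 hj0 (by exact_mod_cast hlt)] at hz; exact hz
        rw [if_pos hz, ih (j + 1) (by omega) (by omega) (by omega) i (l + 1)]
        rw [hnext, hdrop]
        simp only [List.takeWhile_cons, hget, beq_self_eq_true, if_true, List.length_cons]
        by_cases hc : ((a.drop (j.toNat + 1)).takeWhile (fun x => x == 0)).length
            = (a.drop (j.toNat + 1)).length
        · rw [if_pos hc, if_pos (by omega)]
          simp only [Prod.mk.injEq]
          and_intros <;> first | trivial | (push_cast; ring)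
        · rw [if_neg hc, if_neg (by omega)]
          simp only [Prod.mk.injEq]
          and_intros <;> first | trivial | (push_cast; ring)
      case neg =>
        have hget : ¬ a[j.toNat] = 0 := by
          rw [PySem.List.pyGetD_eq_getElem a 0 hj0 (by exact_mod_cast hlt)] at hz; exact hz
        rw [if_neg hz, hdrop]
        simp only [List.takeWhile_cons, beq_iff_eq, hget, if_false, List.length_nil,
          List.length_cons]
        rw [if_neg (by omega)]
        simp

theorem zsInner_eq (a : List Int) (j : Int) (hj0 : 0 ≤ j) (hjle : j.toNat ≤ a.length)
    (i l : Int) :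
    zsInner a (a.length : Int) i j l =
      (if ((a.drop j.toNat).takeWhile (fun x => x == 0)).length = (a.drop j.toNat).length
       then (l + ((((a.drop j.toNat).takeWhile (fun x => x == 0)).length : Nat) : Int), i,
             j + ((((a.drop j.toNat).takeWhile (fun x => x == 0)).length : Nat) : Int))
       else (l + ((((a.drop j.toNat).takeWhile (fun x => x == 0)).length : Nat) : Int),
             j + ((((a.drop j.toNat).takeWhile (fun x => x == 0)).length : Nat) : Int),
             (a.length : Int) + 1)) := by
  unfold zsInner
  exact zsInnerGo_eq a (((a.length : Int) - j).toNat) j hj0 hjle (by omega) i l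

theorem runsAux_all_zero (t : List Int) : ∀ (i run : Int), 0 < run → (∀ x ∈ t, x = 0) →
    runsAux t i run = [(i - run, run + (t.length : Int))] := by
  induction t with
  | nil =>
    intro i run hr _
    rw [runsAux, if_pos (by omega : run ≠ 0)]
    simp
  | cons x t ih =>
    intro i run hr hall
    have hx : x = 0 := hall x (by simp)
    rw [runsAux, if_pos hx, ih (i + 1) (run + 1) (by omega) (fun y hy => hall y (by simp [hy]))]
    simp only [List.length_cons, List.cons.injEq, Prod.mk.injEq]
    and_intros <;> first | trivial | (push_cast; ring)

theorem runsAux_break (t : List Int) : ∀ (i run : Int), 0 < run →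
    (t.takeWhile (fun x => x == 0)).length < t.length →
    runsAux t i run =
      (i - run, run + ((t.takeWhile (fun x => x == 0)).length : Int)) ::
        runsAux (t.drop ((t.takeWhile (fun x => x == 0)).length + 1))
          (i + ((t.takeWhile (fun x => x == 0)).length : Int) + 1) 0 := by
  induction t with
  | nil => intro i run _ h; simp at h
  | cons x t ih =>
    intro i run hr hlen
    by_cases hx : x = 0
    · simp only [List.takeWhile_cons, hx, beq_self_eq_true, if_true, List.length_cons] at *
      rw [runsAux, if_pos rfl, ih (i + 1) (run + 1) (by omega) (by omega)]
      simp only [List.drop_succ_cons, List.cons.injEq, Prod.mk.injEq]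
      refine ⟨⟨by push_cast; ring, by push_cast; ring⟩, ?_⟩
      congr 1
      push_cast
      ring
    · simp only [List.takeWhile_cons, beq_iff_eq, hx, if_false, List.length_nil]
      rw [runsAux, if_neg hx, if_pos (by omega)]
      simp

-- characterization of A's outer loop (length parameter is always 0 at its call sites)
theorem zsOuterGo_eq (a : List Int) : ∀ (n : Nat) (i : Int) (res : List (Int × Int)) (j : Int),
    0 ≤ i → a.length - i.toNat ≤ n → j ≠ (a.length : Int) →
    zsOuterGo a (a.length : Int) n res i j 0 = res ++ runsAux (a.drop i.toNat) i 0 := by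
  intro n
  induction n with
  | zero =>
    intro i res j hi hn hj
    have hdrop : a.drop i.toNat = [] := List.drop_eq_nil_of_le (by omega)
    simp [zsOuterGo, hdrop, runsAux]
  | succ n ih =>
    intro i res j hi hn hj
    by_cases hlt : i < (a.length : Int)
    case neg =>
      rw [zsOuterGo, if_neg hlt]
      have hdrop : a.drop i.toNat = [] := List.drop_eq_nil_of_le (by omega)
      simp [hdrop, runsAux]
    case pos =>
      have hjlt : i.toNat < a.length := by omega
      have hdrop : a.drop i.toNat = a[i.toNat] :: a.drop (i.toNat + 1) :=
        List.drop_eq_getElem_cons hjlt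
      have hnext : (i + 1).toNat = i.toNat + 1 := by omega
      rw [zsOuterGo, if_pos hlt, if_neg hj]
      by_cases hz : PySem.List.pyGetD a i 0 = 0
      case neg =>
        rw [if_neg hz]
        have hget : ¬ a[i.toNat] = 0 := by
          rw [PySem.List.pyGetD_eq_getElem a 0 hi (by exact_mod_cast hlt)] at hz; exact hz
        rw [ih (i + 1) res j (by omega) (by omega) hj, hdrop]
        rw [runsAux, if_neg hget, if_neg (by simp), hnext]
      case pos =>
        rw [if_pos hz]
        have hget : a[i.toNat] = 0 := by
          rw [PySem.List.pyGetD_eq_getElem a 0 hi (by exact_mod_cast hlt)] at hz; exact hz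
        rw [zsInner_eq a (i + 1) (by omega) (by omega)]
        simp only [hnext]
        set t := a.drop (i.toNat + 1) with ht
        set z := (t.takeWhile (fun x => x == 0)).length with hzdef
        have htlen : i.toNat + 1 + t.length = a.length := by
          rw [ht]; simp; omega
        have hzle : z ≤ t.length := by rw [hzdef]; exact (List.takeWhile_prefix _).length_le
        by_cases hc : z = t.length
        case pos =>
          rw [if_pos hc]
          have hN : i + 1 + (z : Int) = (a.length : Int) := by omega
          simp only [hN, zsOuterGo_stop]
          have hall : ∀ x ∈ t, x = 0 := by
            have hself : t.takeWhile (fun x => x == 0) = t :=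
              (List.takeWhile_prefix _).eq_of_length (by omega)
            intro x hx
            have := List.takeWhile_eq_self_iff.mp hself x hx
            simpa using this
          rw [hdrop, runsAux, if_pos hget,
            runsAux_all_zero t (i + 1) (0 + 1) (by omega) hall]
          simp only [List.append_cancel_left_eq, List.cons.injEq, Prod.mk.injEq]
          and_intros <;> first | trivial | (push_cast; omega)
        case neg =>
          rw [if_neg hc]
          rw [ih (i + 1 + (z : Int) + 1) (res ++ [(i, 0 + 1 + (z : Int))]) ((a.length : Int) + 1)
            (by omega) (by omega) (by omega)]
          rw [hdrop, runsAux, if_pos hget,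
            runsAux_break t (i + 1) (0 + 1) (by omega) (by omega)]
          rw [List.append_assoc]
          congr 1
          have hdd : t.drop (z + 1) = a.drop (i + 1 + (z : Int) + 1).toNat := by
            rw [ht, List.drop_drop]; congr 1; omega
          rw [← hzdef, hdd]
          simp only [List.singleton_append, List.cons.injEq, Prod.mk.injEq]
          and_intros <;> first | trivial | rfl | (push_cast; ring)

theorem zero_sequences_eq_runsAux (address : List Int) :
    zero_sequences address = runsAux address 0 0 := by
  unfold zero_sequences zsOuter
  by_cases h0 : address = []
  · subst h0; simp [zsOuterGo, runsAux]
  · have hlen : address.length ≠ 0 := by simpa using h0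
    have := zsOuterGo_eq address (((address.length : Int) - 0).toNat) 0 [] 0
      (by omega) (by omega) (by omega)
    simpa using this

theorem alt_eq_runsAux (address : List Int) :
    zero_sequences_alt address = runsAux address 0 0 := by
  have h := alt_eq_runsAux_aux address 0 [] 0
  simpa [zero_sequences_alt] using h

-- ===== VERDICT (by name: the statement is the Claim_ definition above) =====
theorem zero_sequences_spec : Claim_equal_zero_sequences := by
  intro address _
  unfold Spec_zero_sequences
  rw [zero_sequences_eq_runsAux, alt_eq_runsAux]
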